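-- pv_equiv track=rewrite | github.com/megid0105/dino-ds | src/dino_ds/validators/repetition_gate_v41.py | _first_triplicate_token
-- ===== SOURCE A (Python) =====
-- from collections import Counter, deque
--
-- def _first_triplicate_token(tokens: list[str], window: int) -> str | None:
--     if len(tokens) < 3:
--         return None
--     counts: Counter[str] = Counter()
--     q: deque[str] = deque()
--     for tok in tokens:
--         q.append(tok)
--         counts[tok] += 1
--         if len(q) > window:
--             old = q.popleft()
--             counts[old] -= 1
--             if counts[old] <= 0:
--                 counts.pop(old, None)
--         if len(q) >= 3:
--             for key, n in counts.items():
--                 if n >= 3: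
--                     return key
--     return None
-- ===== SOURCE B (Python) =====
-- def _first_triplicate_token(tokens: list[str], window: int) -> str | None:
--     # Rescan: the first index whose trailing window holds 3 copies of the current token.
--     for i, tok in enumerate(tokens):
--         lo = max(0, i - window + 1)
--         if tokens[lo:i + 1].count(tok) >= 3:
--             return tok
--     return None
-- ===== Notes on version B (the rewrite author's own statement) =====
-- stated objective: simpler
-- what changed: Replaced the deque+Counter sliding-window state machine by a stateless rescan: for each index i, count the current token in the clamped slice tokens[max(0,i-window+1):i+1] and return it at the first index where that count reaches 3.
import Mathlib
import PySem

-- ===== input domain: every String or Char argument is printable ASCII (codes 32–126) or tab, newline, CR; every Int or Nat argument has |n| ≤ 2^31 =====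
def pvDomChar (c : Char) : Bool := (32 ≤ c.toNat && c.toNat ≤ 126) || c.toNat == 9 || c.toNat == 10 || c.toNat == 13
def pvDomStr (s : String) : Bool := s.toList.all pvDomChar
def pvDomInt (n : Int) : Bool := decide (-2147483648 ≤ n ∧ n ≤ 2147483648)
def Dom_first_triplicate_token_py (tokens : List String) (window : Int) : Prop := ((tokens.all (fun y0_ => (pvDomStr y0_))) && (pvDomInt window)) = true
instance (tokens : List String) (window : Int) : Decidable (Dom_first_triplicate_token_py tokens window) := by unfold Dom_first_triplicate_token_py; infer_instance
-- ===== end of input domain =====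

-- B replaces A's deque+Counter sliding-window state machine by a stateless per-index rescan of
-- the clamped window slice (objective: simpler). Return values agree on all inputs.

-- ===== PORT A =====
-- A's loop body before the scan: q.append(tok); counts[tok] += 1;
-- if len(q) > window: old = q.popleft(); counts[old] -= 1; if counts[old] <= 0: counts.pop(old, None)
def ftA_step (window : Int) (tok : String) (q : List String) (counts : PySem.Dict String Int) :
    List String × PySem.Dict String Int :=
  let q1 := q ++ [tok]
  let c1 := counts.modify tok 0 (· + 1)
  if ((q1.length : Int) > window) then
    match q1 with
    | [] => (([] : List String), c1)
    | old :: q' =>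
        let c2 := c1.modify old 0 (· - 1)
        (q', if c2.getD old 0 ≤ 0 then c2.erase old else c2)
  else (q1, c1)

-- A's 'for tok in tokens' loop; the inner 'for key, n in counts.items()' scan is the find?
def ftA_loop (window : Int) : List String → List String → PySem.Dict String Int → Option String
  | [], _, _ => none
  | tok :: rest, q, counts =>
      let st := ftA_step window tok q counts
      if st.1.length ≥ 3 then
        match st.2.items.find? (fun kv => 3 ≤ kv.2) with
        | some kv => some kv.1
        | none => ftA_loop window rest st.1 st.2
      else ftA_loop window rest st.1 st.2

def first_triplicate_token_py (tokens : List String) (window : Int) : Option String :=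
  if (tokens.length : Int) < 3 then none
  else ftA_loop window tokens [] PySem.Dict.empty

-- ===== PORT B =====
-- B's 'for i, tok in enumerate(tokens)' loop
def ftB_loop (tokens : List String) (window : Int) : List (Int × String) → Option String
  | [] => none
  | (i, tok) :: rest =>
      let lo := max 0 (i - window + 1)
      if (PySem.List.slice tokens (some lo) (some (i + 1))).count tok ≥ 3 then some tok
      else ftB_loop tokens window rest

def first_triplicate_token_py_alt (tokens : List String) (window : Int) : Option String :=
  ftB_loop tokens window (PySem.List.enumerate tokens 0)

-- ===== PRECONDITION & SPEC =====
def Spec_first_triplicate_token_py (tokens : List String) (window : Int) (out : Option String) : Prop := out = first_triplicate_token_py_alt tokens window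
instance (tokens : List String) (window : Int) (out : Option String) : Decidable (Spec_first_triplicate_token_py tokens window out) := by unfold Spec_first_triplicate_token_py; infer_instance

-- ===== CLAIM (what is proved, stated in full; the proofs are below) =====
def Claim_equal_first_triplicate_token_py : Prop := ∀ (tokens : List String) (window : Int), Dom_first_triplicate_token_py tokens window → Spec_first_triplicate_token_py tokens window (first_triplicate_token_py tokens window)

-- ===== LEMMAS AND PROOFS =====

-- the invariant tying A's Counter to its deque contents
def CInv (q : List String) (d : PySem.Dict String Int) : Prop :=
  d.keys.Nodup ∧ (∀ k, d.getD k 0 = (q.count k : Int)) ∧ (∀ k, d.contains k = true ↔ 0 < q.count k)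

theorem pv_find?_filter_self {κ ν : Type} [BEq κ] [LawfulBEq κ] (l : List (κ × ν)) (k : κ) :
    (l.filter (fun p => !(p.1 == k))).find? (fun p => p.1 == k) = none := by
  induction l with
  | nil => simp
  | cons p rest ih =>
      by_cases hp : p.1 = k <;> simp [List.filter_cons, hp, List.find?_cons, ih]

theorem pv_find?_filter_ne {κ ν : Type} [BEq κ] [LawfulBEq κ] (l : List (κ × ν)) (k j : κ)
    (hjk : j ≠ k) :
    (l.filter (fun p => !(p.1 == k))).find? (fun p => p.1 == j) = l.find? (fun p => p.1 == j) := by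
  induction l with
  | nil => simp
  | cons p rest ih =>
      by_cases hp : p.1 = k
      · have hkj : (k == j) = false := by simp [Ne.symm hjk]
        simp [List.filter_cons, hp, List.find?_cons, hkj, ih]
      · have hp' : (!p.1 == k) = true := by simp [hp]
        rw [List.filter_cons, if_pos hp']
        by_cases hj : p.1 = j <;> simp [List.find?_cons, hj, ih]

theorem pv_get?_erase {κ ν : Type} [BEq κ] [LawfulBEq κ] [DecidableEq κ] (d : PySem.Dict κ ν) (k j : κ) :
    (d.erase k).get? j = if j = k then none else d.get? j := by
  by_cases h : j = k
  · subst h; simp [PySem.Dict.erase, PySem.Dict.get?, pv_find?_filter_self]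
  · simp [PySem.Dict.erase, PySem.Dict.get?, pv_find?_filter_ne _ _ _ h, h]

theorem pv_getD_erase {κ ν : Type} [BEq κ] [LawfulBEq κ] [DecidableEq κ] (d : PySem.Dict κ ν) (k j : κ) (v0 : ν) :
    (d.erase k).getD j v0 = if j = k then v0 else d.getD j v0 := by
  simp [PySem.Dict.getD, pv_get?_erase]
  split_ifs <;> rfl

theorem pv_contains_erase {κ ν : Type} [BEq κ] [LawfulBEq κ] [DecidableEq κ] (d : PySem.Dict κ ν) (k j : κ) :
    (d.erase k).contains j = if j = k then false else d.contains j := by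
  rw [PySem.Dict.contains_eq_isSome_get?, pv_get?_erase, PySem.Dict.contains_eq_isSome_get?]
  split_ifs <;> simp

theorem pv_nodup_keys_erase {κ ν : Type} [BEq κ] (d : PySem.Dict κ ν) (k : κ)
    (h : d.keys.Nodup) : (d.erase k).keys.Nodup := by
  have hs : (d.erase k).items.Sublist d.items := List.filter_sublist
  exact (hs.map Prod.fst).nodup h

theorem pv_nodup_modify (d : PySem.Dict String Int) (k : String) (d0 : Int) (f : Int → Int)
    (h : d.keys.Nodup) : (d.modify k d0 f).keys.Nodup := by
  have := PySem.Dict.keys_modify d k d0 f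
  have h2 := PySem.Dict.nodup_keys_insert d k (f (d.getD k d0)) h
  simpa [this] using h2

theorem pv_scan_none (q : List String) (d : PySem.Dict String Int) (h : CInv q d)
    (hlt : ∀ k, q.count k < 3) : d.items.find? (fun kv => 3 ≤ kv.2) = none := by
  obtain ⟨hnd, hgetD, _⟩ := h
  rw [List.find?_eq_none]
  rintro ⟨k, v⟩ hm
  have hv : v = (q.count k : Int) := by
    have := PySem.Dict.getD_of_mem_items d hm hnd 0
    rw [← this, hgetD]
  have := hlt k
  simp only [hv, decide_eq_true_eq]
  intro hc
  omega

theorem pv_scan_some (q : List String) (d : PySem.Dict String Int) (h : CInv q d) (tok : String)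
    (h3 : 3 ≤ q.count tok) (honly : ∀ k, k ≠ tok → q.count k < 3) :
    ∃ v, d.items.find? (fun kv => 3 ≤ kv.2) = some (tok, v) := by
  obtain ⟨hnd, hgetD, hcont⟩ := h
  have hc : d.contains tok = true := (hcont tok).mpr (by omega)
  rw [PySem.Dict.contains] at hc
  rw [List.any_eq_true] at hc
  obtain ⟨p, hp, hpt⟩ := hc
  have hpt : p.1 = tok := by simpa using hpt
  cases hfind : d.items.find? (fun kv => 3 ≤ kv.2) with
  | none =>
      exfalso
      rw [List.find?_eq_none] at hfind
      refine hfind p hp ?_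
      have : p.2 = (q.count p.1 : Int) := by
        have := PySem.Dict.getD_of_mem_items d (k := p.1) (v := p.2) (by simpa using hp) hnd 0
        rw [← this, hgetD]
      simp [this, hpt]
      omega
  | some r =>
      have hr1 : r ∈ d.items := List.mem_of_find?_eq_some hfind
      have hr2 : 3 ≤ r.2 := by simpa using List.find?_some hfind
      have hrv : r.2 = (q.count r.1 : Int) := by
        have := PySem.Dict.getD_of_mem_items d (k := r.1) (v := r.2) (by simpa using hr1) hnd 0
        rw [← this, hgetD]
      have : r.1 = tok := by
        by_contra hne
        have := honly r.1 hne
        omega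
      exact ⟨r.2, by rw [← this]⟩

theorem pv_B_short (tokens : List String) (window : Int) (h : tokens.length < 3) :
    ∀ l, ftB_loop tokens window l = none := by
  intro l
  induction l with
  | nil => rfl
  | cons p rest ih =>
      obtain ⟨i, tok⟩ := p
      rw [ftB_loop]
      have hlen : (PySem.List.slice tokens (some (max 0 (i - window + 1))) (some (i + 1))).length ≤ tokens.length := by
        rw [PySem.List.length_slice]
        have := PySem.List.clampIdx_le tokens.length (i + 1)
        omega
      have hcnt := List.count_le_length (l := PySem.List.slice tokens (some (max 0 (i - window + 1))) (some (i + 1))) (a := tok)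
      rw [if_neg (by omega)]
      exact ih

theorem pv_step_inv (window : Int) (tok : String) (q : List String) (counts : PySem.Dict String Int)
    (h : CInv q counts) :
    CInv (ftA_step window tok q counts).1 (ftA_step window tok q counts).2 ∧
    (∀ k, k ≠ tok → (ftA_step window tok q counts).1.count k ≤ q.count k) ∧
    (ftA_step window tok q counts).1.count tok ≤ q.count tok + 1 := by
  obtain ⟨hnd, hgetD, hcont⟩ := h
  have hq1c : ∀ j, List.count j (q ++ [tok]) = List.count j q + (if j = tok then 1 else 0) := by
    intro j
    by_cases hj : j = tok <;> simp [List.count_append, List.count_eq_zero, hj]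
  rw [ftA_step]
  have hnd1 : (counts.modify tok 0 (· + 1)).keys.Nodup := pv_nodup_modify _ _ _ _ hnd
  have hgetD1 : ∀ k, (counts.modify tok 0 (· + 1)).getD k 0 = ((q ++ [tok]).count k : Int) := by
    intro k
    rw [PySem.Dict.getD_modify, hq1c k]
    by_cases hk : k = tok
    · rw [if_pos hk, hk, hgetD, if_pos rfl]; push_cast; ring
    · rw [if_neg hk, hgetD, if_neg hk]; push_cast; ring
  have hcont1 : ∀ k, (counts.modify tok 0 (· + 1)).contains k = true ↔ 0 < (q ++ [tok]).count k := by
    intro k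
    rw [PySem.Dict.contains_modify, hq1c k]
    by_cases hk : k = tok
    · simp [hk]
    · simp [hk, hcont]
  split
  · -- pop branch
    rename_i hpop
    split
    · rename_i heq
      exact absurd heq (by simp)
    · rename_i old q' heq
      have hq'c : ∀ j, List.count j (q ++ [tok]) = List.count j q' + (if j = old then 1 else 0) := by
        intro j
        rw [heq, List.count_cons]
        by_cases hj : j = old
        · simp [hj]
        · simp [hj, Ne.symm hj]
      have hgetD2 : ∀ k, ((counts.modify tok 0 (· + 1)).modify old 0 (· - 1)).getD k 0 = (q'.count k : Int) := by
        intro k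
        rw [PySem.Dict.getD_modify]
        by_cases hk : k = old
        · rw [if_pos hk, hgetD1, hk, hq'c old, if_pos rfl]
          push_cast
          ring
        · rw [if_neg hk, hgetD1, hq'c k, if_neg hk]
          push_cast
          ring
      have hcont2 : ∀ k, ((counts.modify tok 0 (· + 1)).modify old 0 (· - 1)).contains k = true ↔ 0 < (q ++ [tok]).count k := by
        intro k
        rw [PySem.Dict.contains_modify]
        have hold : 0 < (q ++ [tok]).count old := by
          rw [hq'c old, if_pos rfl]; omega
        by_cases hk : k = old
        · subst hk
          constructor
          · intro _; exact hold
          · intro _; simp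
        · simp [hk, hcont1]
      have hnd2 : ((counts.modify tok 0 (· + 1)).modify old 0 (· - 1)).keys.Nodup :=
        pv_nodup_modify _ _ _ _ hnd1
      refine ⟨⟨?_, ?_, ?_⟩, ?_, ?_⟩
      · dsimp only
        split
        · exact pv_nodup_keys_erase _ _ hnd2
        · exact hnd2
      · intro k
        dsimp only
        split
        · rename_i hz
          rw [pv_getD_erase]
          rw [hgetD2 old] at hz
          by_cases hk : k = old
          · rw [if_pos hk, hk]
            have : q'.count old = 0 := by exact_mod_cast by omega
            rw [this]; rfl
          · rw [if_neg hk, hgetD2]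
        · exact hgetD2 k
      · intro k
        dsimp only
        split
        · rename_i hz
          rw [pv_contains_erase]
          rw [hgetD2 old] at hz
          have hzo : q'.count old = 0 := by exact_mod_cast by omega
          by_cases hk : k = old
          · rw [if_pos hk, hk]; simp [hzo]
          · rw [if_neg hk, hcont2]
            have := hq'c k
            rw [if_neg hk] at this
            omega
        · rename_i hz
          rw [hgetD2 old] at hz
          have hzo : 0 < q'.count old := by exact_mod_cast by omega
          rw [hcont2]
          by_cases hk : k = old
          · subst hk
            have := hq'c k
            constructor <;> intro <;> omega
          · have := hq'c k
            rw [if_neg hk] at this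
            omega
      · intro k hk
        dsimp only
        have h1 := hq'c k
        have h2 := hq1c k
        rw [if_neg hk] at h2
        omega
      · dsimp only
        have h1 := hq'c tok
        have h2 := hq1c tok
        rw [if_pos rfl] at h2
        omega
  · refine ⟨⟨hnd1, hgetD1, hcont1⟩, ?_, ?_⟩
    · intro k hk
      dsimp only
      rw [hq1c k, if_neg hk]
      omega
    · dsimp only
      rw [hq1c tok, if_pos rfl]

theorem pv_step_shape (window : Int) (tok : String) (done : List String) (counts : PySem.Dict String Int) :
    (ftA_step window tok (done.drop ((done.length : Int) - window).toNat) counts).1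
      = (done ++ [tok]).drop (((done.length : Int) + 1 - window)).toNat := by
  rw [ftA_step]
  set n := done.length with hn
  set d := (((n : Int)) - window).toNat with hd
  set d' := (((n : Int)) + 1 - window).toNat with hd'
  dsimp only
  split
  · rename_i hpop
    have hlen : (done.drop d ++ [tok]).length = (n - d) + 1 := by simp [← hn]
    split
    · rename_i heq
      exact absurd heq (by simp)
    · rename_i old q' heq
      cases hq : done.drop d with
      | nil =>
          rw [hq] at heq
          simp at heq
          obtain ⟨-, hq'⟩ := heq
          have hnd : n ≤ d := by
            have := List.drop_eq_nil_iff.mp hq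
            omega
          have hw : window ≤ 0 := by
            rw [hq] at hpop
            simp at hpop
            omega
          have hnil : (done ++ [tok]).length ≤ d' := by simp [← hn]; omega
          dsimp only
          rw [List.drop_eq_nil_iff.mpr hnil, hq']
      | cons h t =>
          rw [hq] at heq
          have hol : old = h ∧ q' = t ++ [tok] := by
            constructor <;> · injection heq with h1 h2 <;> simp_all
          have hdn : d < n := by
            by_contra hc
            rw [List.drop_eq_nil_iff.mpr (by omega)] at hq
            exact absurd hq (by simp)
          rw [hlen] at hpop
          have hdd : d' = d + 1 ∧ d' ≤ n := by omega
          dsimp only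
          rw [hol.2, List.drop_append_of_le_length (by omega : d' ≤ done.length), hdd.1, ← List.tail_drop, hq]
          rfl
  · rename_i hpop
    have hlen : (done.drop d ++ [tok]).length = (n - d) + 1 := by simp [← hn]
    rw [hlen] at hpop
    have hdd : d = 0 ∧ d' = 0 := by omega
    dsimp only
    rw [hdd.1, hdd.2]
    simp

theorem pv_slice_eq (done : List String) (tok : String) (rest : List String) (window : Int) :
    PySem.List.slice (done ++ tok :: rest) (some (max 0 ((done.length : Int) - window + 1))) (some ((done.length : Int) + 1))
      = (done ++ [tok]).drop (((done.length : Int) + 1 - window)).toNat := by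
  rw [PySem.List.slice_toNat (done ++ tok :: rest) (le_max_left 0 _) (by omega)]
  have h1 : (max 0 ((done.length : Int) - window + 1)).toNat = ((done.length : Int) + 1 - window).toNat := by omega
  have h2 : ((done.length : Int) + 1).toNat = done.length + 1 := by omega
  rw [h1, h2, ← List.drop_take]
  congr 1
  rw [List.take_append]
  simp

-- main loop equivalence
theorem pv_main (window : Int) (tokens : List String) :
    ∀ (rest done q : List String) (counts : PySem.Dict String Int),
      tokens = done ++ rest →
      q = done.drop ((done.length : Int) - window).toNat →
      CInv q counts →
      (∀ k, q.count k < 3) →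
      ftA_loop window rest q counts
        = ftB_loop tokens window (PySem.List.enumerate rest (done.length : Int)) := by
  intro rest
  induction rest with
  | nil =>
      intro done q counts _ _ _ _
      rw [ftA_loop.eq_def, PySem.List.enumerate_nil, ftB_loop]
  | cons tok rest' ih =>
      intro done q counts htok hq hinv hlt
      subst hq
      obtain ⟨hinv', hbnd, hbtok⟩ := pv_step_inv window tok _ counts hinv
      have hshape := pv_step_shape window tok done counts
      rw [ftA_loop, PySem.List.enumerate_cons, ftB_loop]
      have hslice : PySem.List.slice tokens (some (max 0 ((done.length : Int) - window + 1)))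
          (some ((done.length : Int) + 1))
          = (ftA_step window tok (done.drop (((done.length : Int)) - window).toNat) counts).1 := by
        rw [htok, pv_slice_eq, ← hshape]
      rw [hslice]
      by_cases h3 : 3 ≤ (ftA_step window tok (done.drop (((done.length : Int)) - window).toNat) counts).1.count tok
      · obtain ⟨v, hv⟩ := pv_scan_some _ _ hinv' tok h3
          (fun k hk => lt_of_le_of_lt (hbnd k hk) (hlt k))
        have hlen3 : (ftA_step window tok (done.drop (((done.length : Int)) - window).toNat) counts).1.length ≥ 3 :=
          le_trans h3 (List.count_le_length)
        have h3' : (ftA_step window tok (done.drop (((done.length : Int)) - window).toNat) counts).1.count tok ≥ 3 := h3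
        rw [if_pos hlen3, if_pos h3', hv]
      · have hall : ∀ k, (ftA_step window tok (done.drop (((done.length : Int)) - window).toNat) counts).1.count k < 3 := by
          intro k
          by_cases hk : k = tok
          · subst hk; omega
          · exact lt_of_le_of_lt (hbnd k hk) (hlt k)
        have hrec : ftA_loop window rest'
              (ftA_step window tok (done.drop (((done.length : Int)) - window).toNat) counts).1
              (ftA_step window tok (done.drop (((done.length : Int)) - window).toNat) counts).2
            = ftB_loop tokens window (PySem.List.enumerate rest' ((done.length : Int) + 1)) := by
          have hlen1 : ((done ++ [tok]).length : Int) = (done.length : Int) + 1 := by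
            push_cast
            simp
          have := ih (done ++ [tok])
            (ftA_step window tok (done.drop (((done.length : Int)) - window).toNat) counts).1
            (ftA_step window tok (done.drop (((done.length : Int)) - window).toNat) counts).2
            (by rw [htok]; simp)
            (by rw [hshape, hlen1])
            hinv' hall
          rw [this, hlen1]
        have h3' : ¬ ((ftA_step window tok (done.drop (((done.length : Int)) - window).toNat) counts).1.count tok ≥ 3) := h3
        rw [if_neg h3']
        split
        · rw [pv_scan_none _ _ hinv' hall]
          exact hrec
        · exact hrec

-- ===== VERDICT (by name: the statement is the Claim_ definition above) =====
theorem first_triplicate_token_py_spec : Claim_equal_first_triplicate_token_py := by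
  intro tokens window _
  unfold Spec_first_triplicate_token_py first_triplicate_token_py first_triplicate_token_py_alt
  split
  · rename_i h
    exact (pv_B_short tokens window (by exact_mod_cast by omega) _).symm
  · rename_i h
    have := pv_main window tokens tokens [] [] PySem.Dict.empty rfl (by simp)
      ⟨by simp [PySem.Dict.keys, PySem.Dict.empty],
       by intro k; simp [PySem.Dict.getD_empty],
       by intro k; simp [PySem.Dict.contains_empty]⟩
      (by intro k; simp)
    simpa using this
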